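-- pv_equiv track=rewrite | github.com/alirafiqmalik/LogicTune | src/logictune/verifier.py | check
-- ===== SOURCE A (Python) =====
-- from typing import Set, Dict, List, Tuple, Optional
--
-- def check(controller_rules: List[Dict]) -> bool:
--     has_red_stop = False
--     has_yellow_stop = False
--     has_violation = False
--
--     for rule in controller_rules:
--         cond = rule.get('condition', '').lower()
--         action = rule.get('action', '').lower()
--         raw = rule.get('raw', '').lower()
--
--         is_red = 'red' in raw
--         is_yellow = 'yellow' in raw
--
--         if is_red:
--             if 'stop' in raw or 'wait' in raw:
--                 has_red_stop = True
--             elif 'go' in raw or 'proceed' in raw or 'turn' in raw: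
--                 if 'stop' not in raw:
--                     has_violation = True
--
--         if is_yellow:
--             if 'stop' in raw or 'slow' in raw or 'prepare' in raw:
--                 has_yellow_stop = True
--             elif 'speed' in raw or 'proceed quickly' in raw or 'go through' in raw:
--                 has_violation = True
--             elif 'proceed' in raw and 'stop' not in raw and 'slow' not in raw:
--                 has_violation = True
--
--     for rule in controller_rules:
--         raw = rule.get('raw', '').lower()
--         if 'regardless' in raw or 'always go' in raw:
--             has_violation = True
--
--     if has_violation:
--         return False
--
--     return True
-- ===== SOURCE B (Python) =====
-- from typing import Set, Dict, List, Tuple, Optional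
--
-- # Table-driven re-implementation: extract a feature set of keywords per rule and
-- # interpret a declarative table of violation patterns (need / any-of / forbid sets).
-- _KEYWORDS = ('red', 'yellow', 'stop', 'wait', 'go', 'proceed', 'turn', 'slow',
--              'prepare', 'speed', 'proceed quickly', 'go through',
--              'regardless', 'always go')
--
-- _PATTERNS = (
--     (frozenset(), frozenset({'regardless', 'always go'}), frozenset()),
--     (frozenset({'red'}), frozenset({'go', 'proceed', 'turn'}),
--      frozenset({'stop', 'wait'})),
--     (frozenset({'yellow'}),
--      frozenset({'speed', 'proceed quickly', 'go through', 'proceed'}),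
--      frozenset({'stop', 'slow', 'prepare'})),
-- )
--
-- def check(controller_rules: List[Dict]) -> bool:
--     for rule in controller_rules:
--         raw = rule.get('raw', '').lower()
--         feats = frozenset(k for k in _KEYWORDS if k in raw)
--         for need, anyof, forbid in _PATTERNS:
--             if need <= feats and feats.isdisjoint(forbid) and not feats.isdisjoint(anyof):
--                 return False
--     return True
-- ===== Notes on version B (the rewrite author's own statement) =====
-- stated objective: alternative
-- what changed: Replaces A's two hardcoded stateful passes (with three accumulator flags, two of them dead) by a table-driven interpreter: each rule is reduced to its set of keyword features, which is matched against a declarative (need, any-of, forbid) pattern table in one early-returning scan.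
import Mathlib
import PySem

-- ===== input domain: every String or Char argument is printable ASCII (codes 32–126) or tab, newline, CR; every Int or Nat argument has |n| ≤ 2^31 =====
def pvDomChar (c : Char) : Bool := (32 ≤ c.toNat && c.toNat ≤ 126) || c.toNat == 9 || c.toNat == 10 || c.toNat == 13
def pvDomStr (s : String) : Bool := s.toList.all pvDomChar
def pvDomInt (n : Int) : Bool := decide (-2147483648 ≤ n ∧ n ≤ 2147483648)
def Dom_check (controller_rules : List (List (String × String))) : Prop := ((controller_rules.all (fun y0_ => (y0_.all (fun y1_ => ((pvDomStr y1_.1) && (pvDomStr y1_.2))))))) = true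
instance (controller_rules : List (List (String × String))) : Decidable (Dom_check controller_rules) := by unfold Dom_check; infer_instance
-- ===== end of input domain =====

-- B replaces A's two hardcoded stateful passes by a table-driven interpreter: per rule it
-- extracts the set of keywords present and matches a declarative (need, any-of, forbid)
-- pattern table, returning early on the first violation; objective: alternative.

-- ===== PORT A =====
-- rule.get(k, '') on the association-list dict (first match)
def pvGetD (d : List (String × String)) (k : String) : String :=
  match d.find? (fun kv => kv.1 == k) with
  | some kv => kv.2
  | none => ""

-- the red `if` block of A's first loop, acting on (has_red_stop, has_yellow_stop, has_violation)
def pvStepRed (s : Bool × Bool × Bool) (raw : String) : Bool × Bool × Bool :=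
  if PySem.Str.isIn "red" raw then
    if PySem.Str.isIn "stop" raw || PySem.Str.isIn "wait" raw then (true, s.2.1, s.2.2)
    else if PySem.Str.isIn "go" raw || PySem.Str.isIn "proceed" raw || PySem.Str.isIn "turn" raw then
      if !PySem.Str.isIn "stop" raw then (s.1, s.2.1, true) else s
    else s
  else s

-- the yellow `if` block of A's first loop
def pvStepYellow (s : Bool × Bool × Bool) (raw : String) : Bool × Bool × Bool :=
  if PySem.Str.isIn "yellow" raw then
    if PySem.Str.isIn "stop" raw || PySem.Str.isIn "slow" raw || PySem.Str.isIn "prepare" raw then (s.1, true, s.2.2)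
    else if PySem.Str.isIn "speed" raw || PySem.Str.isIn "proceed quickly" raw || PySem.Str.isIn "go through" raw then (s.1, s.2.1, true)
    else if PySem.Str.isIn "proceed" raw && !PySem.Str.isIn "stop" raw && !PySem.Str.isIn "slow" raw then (s.1, s.2.1, true)
    else s
  else s

-- one iteration of A's first loop
def pvStepA (s : Bool × Bool × Bool) (rule : List (String × String)) : Bool × Bool × Bool :=
  let _cond := PySem.Str.lower (pvGetD rule "condition")
  let _action := PySem.Str.lower (pvGetD rule "action")
  let raw := PySem.Str.lower (pvGetD rule "raw")
  pvStepYellow (pvStepRed s raw) raw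

-- one iteration of A's second loop (only the violation flag is live there)
def pvStep2 (v : Bool) (rule : List (String × String)) : Bool :=
  let raw := PySem.Str.lower (pvGetD rule "raw")
  if PySem.Str.isIn "regardless" raw || PySem.Str.isIn "always go" raw then true else v

def check (controller_rules : List (List (String × String))) : Bool :=
  let s := controller_rules.foldl pvStepA (false, false, false)
  let v := controller_rules.foldl pvStep2 s.2.2
  if v then false else true

-- ===== PORT B =====
-- the keyword vocabulary (_KEYWORDS in Source B)
def pvKeywords : List String :=
  ["red", "yellow", "stop", "wait", "go", "proceed", "turn", "slow",
   "prepare", "speed", "proceed quickly", "go through", "regardless", "always go"]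

-- the declarative pattern table (_PATTERNS in Source B): (need, any-of, forbid)
def pvPatterns : List (List String × List String × List String) :=
  [([], ["regardless", "always go"], []),
   (["red"], ["go", "proceed", "turn"], ["stop", "wait"]),
   (["yellow"], ["speed", "proceed quickly", "go through", "proceed"], ["stop", "slow", "prepare"])]

-- the feature set of a rule: the keywords occurring in its lowered raw text
def pvFeats (rule : List (String × String)) : List String :=
  let raw := PySem.Str.lower (pvGetD rule "raw")
  pvKeywords.filter (fun k => PySem.Str.isIn k raw)

-- does some pattern of the table match this feature set?
def pvMatches (feats : List String) : Bool :=
  pvPatterns.any (fun p =>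
    p.1.all (fun k => feats.contains k)
    && !(feats.any (fun k => p.2.2.contains k))
    && feats.any (fun k => p.2.1.contains k))

-- the rule loop of Source B: early return False on the first matching rule
def check_alt (controller_rules : List (List (String × String))) : Bool :=
  match controller_rules with
  | [] => true
  | rule :: rest => if pvMatches (pvFeats rule) then false else check_alt rest

-- ===== PRECONDITION & SPEC =====
def Spec_check (controller_rules : List (List (String × String))) (out : Bool) : Prop := out = check_alt controller_rules
instance (controller_rules : List (List (String × String))) (out : Bool) : Decidable (Spec_check controller_rules out) := by unfold Spec_check; infer_instance

-- ===== CLAIM (what is proved, stated in full; the proofs are below) =====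
def Claim_equal_check : Prop := ∀ (controller_rules : List (List (String × String))), Dom_check controller_rules → Spec_check controller_rules (check controller_rules)

-- ===== LEMMAS AND PROOFS =====

-- the violation contribution of one rule in A's first loop
def pvLoop1V (rule : List (String × String)) : Bool :=
  let raw := PySem.Str.lower (pvGetD rule "raw")
  (PySem.Str.isIn "red" raw
     && !(PySem.Str.isIn "stop" raw || PySem.Str.isIn "wait" raw)
     && (PySem.Str.isIn "go" raw || PySem.Str.isIn "proceed" raw || PySem.Str.isIn "turn" raw))
  || (PySem.Str.isIn "yellow" raw
     && !(PySem.Str.isIn "stop" raw || PySem.Str.isIn "slow" raw || PySem.Str.isIn "prepare" raw)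
     && (PySem.Str.isIn "speed" raw || PySem.Str.isIn "proceed quickly" raw
         || PySem.Str.isIn "go through" raw || PySem.Str.isIn "proceed" raw))

-- the violation contribution of one rule in A's second loop
def pvLoop2V (rule : List (String × String)) : Bool :=
  let raw := PySem.Str.lower (pvGetD rule "raw")
  PySem.Str.isIn "regardless" raw || PySem.Str.isIn "always go" raw

lemma pvStepA_snd (s : Bool × Bool × Bool) (rule : List (String × String)) :
    (pvStepA s rule).2.2 = (s.2.2 || pvLoop1V rule) := by
  obtain ⟨a, b, v⟩ := s
  simp only [pvStepA, pvStepRed, pvStepYellow, pvLoop1V]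
  generalize PySem.Str.lower (pvGetD rule "raw") = x
  generalize PySem.Str.isIn "red" x = b1
  generalize PySem.Str.isIn "yellow" x = b2
  generalize PySem.Str.isIn "stop" x = b3
  generalize PySem.Str.isIn "wait" x = b4
  generalize PySem.Str.isIn "go" x = b5
  generalize PySem.Str.isIn "proceed" x = b6
  generalize PySem.Str.isIn "turn" x = b7
  generalize PySem.Str.isIn "slow" x = b8
  generalize PySem.Str.isIn "prepare" x = b9
  generalize PySem.Str.isIn "speed" x = b10
  generalize PySem.Str.isIn "proceed quickly" x = b11
  generalize PySem.Str.isIn "go through" x = b12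
  revert a b v b1 b2 b3 b4 b5 b6 b7 b8 b9 b10 b11 b12
  decide

lemma pvFoldl1_snd (rules : List (List (String × String))) :
    ∀ s : Bool × Bool × Bool, (rules.foldl pvStepA s).2.2 = (s.2.2 || rules.any pvLoop1V) := by
  induction rules with
  | nil => intro s; simp
  | cons r rs ih =>
    intro s
    simp only [List.foldl_cons, List.any_cons, ih, pvStepA_snd, Bool.or_assoc]

lemma pvFoldl2 (rules : List (List (String × String))) :
    ∀ v : Bool, rules.foldl pvStep2 v = (v || rules.any pvLoop2V) := by
  induction rules with
  | nil => intro v; simp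
  | cons r rs ih =>
    intro v
    simp only [List.foldl_cons, List.any_cons, ih, pvStep2, pvLoop2V]
    cases PySem.Str.isIn "regardless" (PySem.Str.lower (pvGetD r "raw")) <;>
    cases PySem.Str.isIn "always go" (PySem.Str.lower (pvGetD r "raw")) <;> simp

-- B's per-rule pattern match agrees with the combined violation flag of A's two loops
lemma pvMatches_eq (rule : List (String × String)) :
    pvMatches (pvFeats rule) = (pvLoop2V rule || pvLoop1V rule) := by
  simp only [pvMatches, pvFeats, pvPatterns, pvLoop1V, pvLoop2V,
    List.contains_eq_any_beq, List.any_filter]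
  simp only [pvKeywords, List.any_cons, List.any_nil]
  simp only [String.reduceBEq, Bool.and_false,
    Bool.and_true, Bool.false_or, Bool.or_false, Bool.or_true, Bool.or_self]
  generalize PySem.Str.lower (pvGetD rule "raw") = x
  generalize PySem.Str.isIn "red" x = b1
  generalize PySem.Str.isIn "yellow" x = b2
  generalize PySem.Str.isIn "stop" x = b3
  generalize PySem.Str.isIn "wait" x = b4
  generalize PySem.Str.isIn "go" x = b5
  generalize PySem.Str.isIn "proceed" x = b6
  generalize PySem.Str.isIn "turn" x = b7
  generalize PySem.Str.isIn "slow" x = b8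
  generalize PySem.Str.isIn "prepare" x = b9
  generalize PySem.Str.isIn "speed" x = b10
  generalize PySem.Str.isIn "proceed quickly" x = b11
  generalize PySem.Str.isIn "go through" x = b12
  generalize PySem.Str.isIn "regardless" x = b13
  generalize PySem.Str.isIn "always go" x = b14
  revert b1 b2 b3 b4 b5 b6 b7 b8 b9 b10 b11 b12 b13 b14
  decide

lemma pvCheckAlt_any (rules : List (List (String × String))) :
    check_alt rules = !(rules.any (fun r => pvMatches (pvFeats r))) := by
  induction rules with
  | nil => simp [check_alt]
  | cons r rs ih =>
    simp only [check_alt, List.any_cons, ih]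
    cases pvMatches (pvFeats r) <;> simp

lemma pvAny_or (rules : List (List (String × String))) (f g : List (String × String) → Bool) :
    rules.any (fun r => f r || g r) = (rules.any f || rules.any g) := by
  induction rules with
  | nil => simp
  | cons r rs ih =>
    simp only [List.any_cons, ih]
    cases f r <;> cases g r <;> simp

-- ===== VERDICT (by name: the statement is the Claim_ definition above) =====
theorem check_spec : Claim_equal_check := by
  intro rules _
  show check rules = check_alt rules
  simp only [check, pvCheckAlt_any, pvFoldl1_snd, pvFoldl2, Bool.false_or]
  rw [funext pvMatches_eq, pvAny_or]
  cases rules.any pvLoop1V <;> cases rules.any pvLoop2V <;> simp
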